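-- pv_equiv track=rewrite | github.com/realgufeoliv/seguranca | Dados_EP_2025/textos_desconhecidos/Descriptografia-hill-3x3.py | avaliacao_rapida
-- ===== SOURCE A (Python) =====
-- def avaliacao_rapida(texto, vocabulario):
--     score = 0
--     palavras_encontradas = set()
--     for tamanho in range(4, 9):
--         for i in range(len(texto) - tamanho + 1):
--             palavra = texto[i:i+tamanho]
--             if palavra in vocabulario and palavra not in palavras_encontradas:
--                 score += vocabulario[palavra]
--                 palavras_encontradas.add(palavra)
--     return score
-- ===== SOURCE B (Python) =====
-- def avaliacao_rapida(texto, vocabulario):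
--     score = 0
--     for palavra, valor in vocabulario.items():
--         if 4 <= len(palavra) <= 8 and palavra in texto:
--             score += valor
--     return score
-- ===== Notes on version B (the rewrite author's own statement) =====
-- stated objective: simpler
-- what changed: Instead of sweeping every text position for every length 4..8 and deduplicating with a found-set, B makes one pass over the vocabulary and adds each entry's value when its key has length 4..8 and occurs as a substring of the text; dedup is automatic because each dict key is visited once (Pre_ excludes association lists with duplicate keys, which encode no Python dict).
import Mathlib
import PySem

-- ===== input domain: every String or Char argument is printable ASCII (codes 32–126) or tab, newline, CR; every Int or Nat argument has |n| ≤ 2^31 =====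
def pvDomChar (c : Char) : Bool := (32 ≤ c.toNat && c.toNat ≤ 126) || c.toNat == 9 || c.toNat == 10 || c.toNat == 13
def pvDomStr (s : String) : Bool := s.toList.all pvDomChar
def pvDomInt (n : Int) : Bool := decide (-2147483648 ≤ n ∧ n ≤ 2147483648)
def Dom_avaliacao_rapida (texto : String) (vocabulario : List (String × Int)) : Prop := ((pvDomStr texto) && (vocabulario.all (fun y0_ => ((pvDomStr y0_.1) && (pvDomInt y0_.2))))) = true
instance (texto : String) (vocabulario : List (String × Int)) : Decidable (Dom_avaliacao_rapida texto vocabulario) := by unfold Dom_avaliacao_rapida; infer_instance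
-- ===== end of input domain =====

-- B inverts the traversal: one pass over the vocabulary with a substring test per key,
-- instead of A's sweep over every text position for every length 4..8 with a found-set.

-- ===== PORT A =====
def avaliacao_rapida (texto : String) (vocabulario : List (String × Int)) : Int :=
  ((PySem.List.pyRange 4 9).foldl
    (fun (st : Int × PySem.Set String) tamanho =>
      (PySem.List.pyRange 0 (PySem.Str.len texto - tamanho + 1)).foldl
        (fun st i =>
          let palavra := PySem.Str.slice texto (some i) (some (i + tamanho))
          if (PySem.Dict.mk vocabulario).contains palavra && !(PySem.Set.contains st.2 palavra) then
            (st.1 + (PySem.Dict.mk vocabulario).getD palavra 0, PySem.Set.add st.2 palavra)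
          else st)
        st)
    ((0 : Int), PySem.Set.empty)).1

-- ===== PORT B =====
def avaliacao_rapida_alt (texto : String) (vocabulario : List (String × Int)) : Int :=
  vocabulario.foldl
    (fun score p =>
      if 4 ≤ PySem.Str.len p.1 ∧ PySem.Str.len p.1 ≤ 8 ∧ PySem.Str.isIn p.1 texto = true then
        score + p.2
      else score)
    0

-- ===== PRECONDITION & SPEC =====
-- Pre_ excludes association lists with duplicate keys: the Python parameter is a dict, whose
-- keys are distinct, so such lists encode no dict input (on them B would count a key twice).
def Pre_avaliacao_rapida (texto : String) (vocabulario : List (String × Int)) : Prop :=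
  (vocabulario.map Prod.fst).Nodup
instance (texto : String) (vocabulario : List (String × Int)) : Decidable (Pre_avaliacao_rapida texto vocabulario) := by unfold Pre_avaliacao_rapida; infer_instance

def pvWitness_avaliacao_rapida : String × (List (String × Int)) := ("abcdx", [("abcd", 3), ("bcdx", 2), ("zzzz", 7)])

def Spec_avaliacao_rapida (texto : String) (vocabulario : List (String × Int)) (out : Int) : Prop := out = avaliacao_rapida_alt texto vocabulario
instance (texto : String) (vocabulario : List (String × Int)) (out : Int) : Decidable (Spec_avaliacao_rapida texto vocabulario out) := by unfold Spec_avaliacao_rapida; infer_instance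

-- ===== CLAIM (what is proved, stated in full; the proofs are below) =====
def Claim_equal_avaliacao_rapida : Prop := ∀ (texto : String) (vocabulario : List (String × Int)), Dom_avaliacao_rapida texto vocabulario → Pre_avaliacao_rapida texto vocabulario → Spec_avaliacao_rapida texto vocabulario (avaliacao_rapida texto vocabulario)

-- ===== LEMMAS AND PROOFS =====

-- The list of all slices A enumerates (length 4..8, every admissible start position).
def pvWords (texto : String) : List String :=
  (PySem.List.pyRange 4 9).flatMap (fun t =>
    (PySem.List.pyRange 0 (PySem.Str.len texto - t + 1)).map (fun i =>
      PySem.Str.slice texto (some i) (some (i + t))))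

-- A's inner-loop body, as a single step over one candidate word.
def pvStep (vocab : List (String × Int)) (st : Int × PySem.Set String) (w : String) :
    Int × PySem.Set String :=
  if (PySem.Dict.mk vocab).contains w && !(PySem.Set.contains st.2 w) then
    (st.1 + (PySem.Dict.mk vocab).getD w 0, PySem.Set.add st.2 w)
  else st

-- The score A's fold still has to add: values of entries whose key occurs in W and is not yet found.
def pvT (vocab : List (String × Int)) (W found : List String) : Int :=
  (vocab.map (fun p => if p.1 ∈ W ∧ p.1 ∉ found then p.2 else 0)).sum

lemma pvA_eq_fold (texto : String) (vocab : List (String × Int)) :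
    avaliacao_rapida texto vocab =
      ((pvWords texto).foldl (pvStep vocab) ((0 : Int), PySem.Set.empty)).1 := by
  simp [avaliacao_rapida, pvWords, pvStep, List.foldl_flatMap, List.foldl_map]

lemma pvT_nil (vocab : List (String × Int)) (found : List String) : pvT vocab [] found = 0 := by
  simp [pvT]

lemma pvT_cons_of_ne (vocab : List (String × Int)) (W found : List String) (w : String)
    (h : w ∉ vocab.map Prod.fst ∨ w ∈ found) :
    pvT vocab (w :: W) found = pvT vocab W found := by
  unfold pvT
  congr 1
  apply List.map_congr_left
  intro p hp
  by_cases hpw : p.1 = w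
  · rcases h with h | h
    · exact absurd (hpw ▸ List.mem_map_of_mem hp) h
    · simp [hpw, h]
  · simp [List.mem_cons, hpw]

lemma pvT_found_append_of_ne (vocab : List (String × Int)) (W found : List String) (w : String)
    (h : w ∉ vocab.map Prod.fst) :
    pvT vocab W (found ++ [w]) = pvT vocab W found := by
  unfold pvT
  congr 1
  apply List.map_congr_left
  intro p hp
  have hpw : p.1 ≠ w := fun he => h (he ▸ List.mem_map_of_mem hp)
  simp [List.mem_append, hpw]

lemma pvT_cons_key (vocab : List (String × Int)) (W found : List String) (w : String) (v : Int)
    (hnd : (vocab.map Prod.fst).Nodup) (hv : (w, v) ∈ vocab) (hf : w ∉ found) :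
    pvT vocab (w :: W) found = v + pvT vocab W (found ++ [w]) := by
  induction vocab with
  | nil => cases hv
  | cons p rest ih =>
    rw [List.map_cons, List.nodup_cons] at hnd
    rcases List.mem_cons.mp hv with hp | hp
    · subst hp
      have hrest : w ∉ rest.map Prod.fst := hnd.1
      unfold pvT
      rw [List.map_cons, List.map_cons, List.sum_cons, List.sum_cons]
      have h1 : pvT rest (w :: W) found = pvT rest W found :=
        pvT_cons_of_ne rest W found w (Or.inl hrest)
      have h2 : pvT rest W (found ++ [w]) = pvT rest W found :=
        pvT_found_append_of_ne rest W found w hrest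
      unfold pvT at h1 h2
      rw [h1, h2]
      simp [hf]
    · have hpw : p.1 ≠ w := by
        intro he
        exact hnd.1 (he ▸ List.mem_map_of_mem hp)
      unfold pvT
      rw [List.map_cons, List.map_cons, List.sum_cons, List.sum_cons]
      have hterm : (if p.1 ∈ w :: W ∧ p.1 ∉ found then p.2 else 0)
          = (if p.1 ∈ W ∧ p.1 ∉ found ++ [w] then p.2 else 0) := by
        simp [List.mem_cons, List.mem_append, hpw]
      rw [hterm]
      have := ih hnd.2 hp
      unfold pvT at this
      rw [this]
      ring

lemma pvFold_inv (vocab : List (String × Int)) (hnd : (vocab.map Prod.fst).Nodup) :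
    ∀ (W : List String) (s : Int) (found : List String),
      (W.foldl (pvStep vocab) (s, found)).1 = s + pvT vocab W found := by
  intro W
  induction W with
  | nil => intro s found; simp [pvT_nil]
  | cons w W ih =>
    intro s found
    rw [List.foldl_cons]
    by_cases hc : (PySem.Dict.mk vocab).contains w = true
    · by_cases hf : w ∈ found
      · have hfc : PySem.Set.contains found w = true := (PySem.Set.contains_iff found w).mpr hf
        have hstep : pvStep vocab (s, found) w = (s, found) := by
          unfold pvStep
          rw [hfc]
          simp
        rw [hstep, ih, pvT_cons_of_ne vocab W found w (Or.inr hf)]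
      · have hfc : PySem.Set.contains found w = false := by
          cases h : PySem.Set.contains found w with
          | false => rfl
          | true => exact absurd ((PySem.Set.contains_iff found w).mp h) hf
        have hstep : pvStep vocab (s, found) w
            = (s + (PySem.Dict.mk vocab).getD w 0, PySem.Set.add found w) := by
          unfold pvStep
          rw [hc, hfc]
          simp
        rw [hstep, ih, PySem.Set.add_of_not_mem hf]
        have hkey : w ∈ vocab.map Prod.fst := by
          have := (PySem.Dict.contains_iff_mem_keys (PySem.Dict.mk vocab) w).mp hc
          simpa [PySem.Dict.keys_mk] using this
        obtain ⟨p, hp, hp1⟩ := List.mem_map.mp hkey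
        have hnd' : (PySem.Dict.mk vocab).keys.Nodup := by
          simpa [PySem.Dict.keys_mk] using hnd
        have hget : (PySem.Dict.mk vocab).getD w 0 = p.2 := by
          have hmem : (w, p.2) ∈ (PySem.Dict.mk vocab).items := by
            show (w, p.2) ∈ vocab
            have : p = (w, p.2) := by
              cases p; simp_all
            exact this ▸ hp
          exact PySem.Dict.getD_of_mem_items _ hmem hnd' 0
        have hentry : (w, p.2) ∈ vocab := by
          have : p = (w, p.2) := by cases p; simp_all
          exact this ▸ hp
        rw [hget, pvT_cons_key vocab W found w p.2 hnd hentry hf]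
        ring
    · have hstep : pvStep vocab (s, found) w = (s, found) := by
        unfold pvStep
        rw [Bool.eq_false_iff.mpr hc]
        simp
      have hkey : w ∉ vocab.map Prod.fst := by
        intro hmem
        apply hc
        rw [PySem.Dict.contains_iff_mem_keys]
        simpa [PySem.Dict.keys_mk] using hmem
      rw [hstep, ih, pvT_cons_of_ne vocab W found w (Or.inl hkey)]

lemma pvA_sum (texto : String) (vocab : List (String × Int))
    (hnd : (vocab.map Prod.fst).Nodup) :
    avaliacao_rapida texto vocab
      = (vocab.map (fun p => if p.1 ∈ pvWords texto then p.2 else 0)).sum := by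
  rw [pvA_eq_fold, pvFold_inv vocab hnd]
  simp [pvT, PySem.Set.empty]

lemma pvB_sum_aux (texto : String) :
    ∀ (vocab : List (String × Int)) (init : Int),
      vocab.foldl
        (fun score p =>
          if 4 ≤ PySem.Str.len p.1 ∧ PySem.Str.len p.1 ≤ 8 ∧ PySem.Str.isIn p.1 texto = true then
            score + p.2
          else score) init
      = init + (vocab.map (fun p =>
          if 4 ≤ PySem.Str.len p.1 ∧ PySem.Str.len p.1 ≤ 8 ∧ PySem.Str.isIn p.1 texto = true then
            p.2 else 0)).sum := by
  intro vocab
  induction vocab with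
  | nil => intro init; simp
  | cons p rest ih =>
    intro init
    rw [List.foldl_cons, ih, List.map_cons, List.sum_cons]
    split <;> ring

lemma mem_pvWords (texto : String) (k : String) :
    k ∈ pvWords texto ↔
      (4 ≤ PySem.Str.len k ∧ PySem.Str.len k ≤ 8 ∧ PySem.Str.isIn k texto = true) := by
  unfold pvWords
  simp only [List.mem_flatMap, List.mem_map, PySem.List.mem_pyRange_one]
  constructor
  · rintro ⟨t, ⟨ht4, ht9⟩, i, ⟨hi0, hiU⟩, rfl⟩
    have hlen : (PySem.Str.len texto) = (texto.toList.length : Int) := PySem.Str.len_eq texto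
    have hsl : texto.toList.length = texto.length := by simp
    rw [hlen] at hiU
    have hiU' : i.toNat + t.toNat ≤ texto.toList.length := by omega
    have hslice : (PySem.Str.slice texto (some i) (some (i + t))).toList
        = (texto.toList.drop i.toNat).take t.toNat := by
      rw [PySem.Str.toList_slice, PySem.Chars.slice_eq_listSlice,
        PySem.List.slice_toNat _ hi0 (by omega)]
      congr 1
      omega
    have hklen : (PySem.Str.slice texto (some i) (some (i + t))).toList.length = t.toNat := by
      rw [hslice]
      simp
      omega
    refine ⟨?_, ?_, ?_⟩
    · rw [PySem.Str.len_eq, hklen]; omega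
    · rw [PySem.Str.len_eq, hklen]; omega
    · rw [PySem.Str.isIn_iff_infix, hslice]
      exact ((List.take_prefix _ _).isInfix).trans ((List.drop_suffix _ _).isInfix)
  · rintro ⟨h4, h8, hin⟩
    rw [PySem.Str.isIn_iff_infix] at hin
    obtain ⟨pre, suf, hsplit⟩ := hin
    have hlen : (PySem.Str.len texto) = (texto.toList.length : Int) := PySem.Str.len_eq texto
    have hklen : PySem.Str.len k = (k.toList.length : Int) := PySem.Str.len_eq k
    have hL : texto.toList.length = pre.length + k.toList.length + suf.length := by
      rw [← hsplit]; simp; omega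
    refine ⟨(k.toList.length : Int), ⟨by omega, by omega⟩,
      (pre.length : Int), ⟨by omega, by omega⟩, ?_⟩
    apply String.toList_inj.mp
    rw [PySem.Str.toList_slice, PySem.Chars.slice_eq_listSlice]
    have : ((pre.length : Int)) + ((k.toList.length : Int)) = ((pre.length + k.toList.length : Nat) : Int) := by
      push_cast; ring
    rw [this, PySem.List.slice_natCast]
    rw [← hsplit]
    rw [List.append_assoc, List.drop_left]
    have : pre.length + k.toList.length - pre.length = k.toList.length := by omega
    rw [this, List.take_left]

-- ===== VERDICT (by name: the statement is the Claim_ definition above) =====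
theorem avaliacao_rapida_spec : Claim_equal_avaliacao_rapida := by
  intro texto vocab _hdom hpre
  unfold Spec_avaliacao_rapida
  rw [pvA_sum texto vocab hpre]
  unfold avaliacao_rapida_alt
  rw [pvB_sum_aux texto vocab 0, zero_add]
  congr 1
  apply List.map_congr_left
  intro p _hp
  by_cases h : p.1 ∈ pvWords texto
  · rw [if_pos h, if_pos ((mem_pvWords texto p.1).mp h)]
  · rw [if_neg h, if_neg (fun hc => h ((mem_pvWords texto p.1).mpr hc))]
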